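-- pv_equiv track=rewrite | github.com/SunilGhimire067/haproxy | haproxy-backend-ui/src/main.py | find_backends
-- ===== SOURCE A (Python) =====
-- from typing import List, Tuple
--
-- def find_backends(lines: List[str]) -> List[Tuple[str, int, int]]:
--     backends = []
--     cur_name = None
--     cur_start = None
--     for i, line in enumerate(lines):
--         stripped = line.strip()
--         if stripped.startswith("#"):
--             continue
--         parts = stripped.split()
--         if not parts:
--             continue
--         if parts[0] in ("backend", "listen", "frontend"):
--             if cur_name is not None:
--                 backends.append((cur_name, cur_start, i))
--             if parts[0] == "backend":
--                 cur_name = parts[1] if len(parts) > 1 else "<unnamed>"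
--                 cur_start = i
--             else:
--                 cur_name = None
--                 cur_start = None
--     if cur_name is not None:
--         backends.append((cur_name, cur_start, len(lines)))
--     return backends
-- ===== SOURCE B (Python) =====
-- def find_backends(lines):
--     headers = []
--     for i, line in enumerate(lines):
--         stripped = line.strip()
--         if stripped.startswith("#"):
--             continue
--         parts = stripped.split()
--         if not parts:
--             continue
--         if parts[0] in ("backend", "listen", "frontend"):
--             headers.append((i, parts[0], parts[1] if len(parts) > 1 else None))
--     result = []
--     for j in range(len(headers)):
--         i, kw, name = headers[j]
--         if kw == "backend":
--             end = headers[j + 1][0] if j + 1 < len(headers) else len(lines)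
--             result.append((name if name is not None else "<unnamed>", i, end))
--     return result
-- ===== Notes on version B (the rewrite author's own statement) =====
-- stated objective: alternative
-- what changed: Replaces A's stateful single pass (running cur_name/cur_start with end-of-loop flush) by two stateless passes: first collect all section headers (index, keyword, optional name), then emit each 'backend' header with its end taken from the next header's index or len(lines).
import Mathlib
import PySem

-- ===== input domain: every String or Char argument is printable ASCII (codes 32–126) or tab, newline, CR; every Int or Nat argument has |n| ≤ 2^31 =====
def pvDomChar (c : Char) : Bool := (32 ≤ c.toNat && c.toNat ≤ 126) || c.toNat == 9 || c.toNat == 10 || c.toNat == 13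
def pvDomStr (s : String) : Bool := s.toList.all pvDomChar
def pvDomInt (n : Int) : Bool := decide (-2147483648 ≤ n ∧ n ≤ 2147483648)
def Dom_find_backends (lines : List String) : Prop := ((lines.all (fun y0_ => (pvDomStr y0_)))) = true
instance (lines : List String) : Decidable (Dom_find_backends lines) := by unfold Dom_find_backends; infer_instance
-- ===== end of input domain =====

-- B replaces A's stateful single pass by two stateless passes (collect headers, then emit
-- backends with the next header's index as the end); same cost, different decomposition.

-- ===== PORT A =====
-- A's for-loop with running (cur_name, cur_start) state, as structural recursion; the index i
-- tracks enumerate, and at list end it equals len(lines), matching A's final flush.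
def findA_go : List String → Int → Option (String × Int) → List (String × Int × Int)
  | [], i, cur => match cur with | some (nm, st) => [(nm, st, i)] | none => []
  | l :: rest, i, cur =>
    let stripped := PySem.Str.strip l
    if PySem.Str.startswith stripped "#" then findA_go rest (i+1) cur
    else
      match PySem.Str.split₀ stripped with
      | [] => findA_go rest (i+1) cur
      | p0 :: ps =>
        if p0 == "backend" || p0 == "listen" || p0 == "frontend" then
          (match cur with | some (nm, st) => [(nm, st, i)] | none => []) ++
          (if p0 == "backend" then
             findA_go rest (i+1) (some ((match ps with | p1 :: _ => p1 | [] => "<unnamed>"), i))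
           else findA_go rest (i+1) none)
        else findA_go rest (i+1) cur

def find_backends (lines : List String) : List (String × Int × Int) := findA_go lines 0 none

-- ===== PORT B =====
-- first pass: collect headers (index, keyword, optional name)
def hdrsB : List String → Int → List (Int × String × Option String)
  | [], _ => []
  | l :: rest, i =>
    let stripped := PySem.Str.strip l
    if PySem.Str.startswith stripped "#" then hdrsB rest (i+1)
    else
      match PySem.Str.split₀ stripped with
      | [] => hdrsB rest (i+1)
      | p0 :: ps =>
        if p0 == "backend" || p0 == "listen" || p0 == "frontend" then
          (i, p0, (match ps with | p1 :: _ => some p1 | [] => none)) :: hdrsB rest (i+1)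
        else hdrsB rest (i+1)

-- second pass: for each 'backend' header, end = next header's index (headers[j+1][0]) or n
def emitB : List (Int × String × Option String) → Int → List (String × Int × Int)
  | [], _ => []
  | (i, kw, nm) :: rest, n =>
    let e := match rest with | [] => n | (j, _, _) :: _ => j
    if kw == "backend" then ((nm.getD "<unnamed>"), i, e) :: emitB rest n
    else emitB rest n

def find_backends_alt (lines : List String) : List (String × Int × Int) :=
  emitB (hdrsB lines 0) (lines.length : Int)

-- ===== PRECONDITION & SPEC =====
def Spec_find_backends (lines : List String) (out : List (String × Int × Int)) : Prop := out = find_backends_alt lines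
instance (lines : List String) (out : List (String × Int × Int)) : Decidable (Spec_find_backends lines out) := by unfold Spec_find_backends; infer_instance

-- ===== CLAIM (what is proved, stated in full; the proofs are below) =====
def Claim_equal_find_backends : Prop := ∀ (lines : List String), Dom_find_backends lines → Spec_find_backends lines (find_backends lines)

-- ===== LEMMAS AND PROOFS =====
-- closing of A's pending section state at boundary e
def closeC (cur : Option (String × Int)) (e : Int) : List (String × Int × Int) :=
  match cur with | some (nm, st) => [(nm, st, e)] | none => []

-- index of the first header, or n if there is none
def firstIdx (hs : List (Int × String × Option String)) (n : Int) : Int :=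
  match hs with | [] => n | (j, _, _) :: _ => j

theorem go_eq (ls : List String) : ∀ (i : Int) (cur : Option (String × Int)),
    findA_go ls i cur =
      closeC cur (firstIdx (hdrsB ls i) (i + ls.length)) ++ emitB (hdrsB ls i) (i + ls.length) := by
  induction ls with
  | nil =>
    intro i cur
    cases cur <;> simp [findA_go, hdrsB, emitB, firstIdx, closeC]
  | cons l rest ih =>
    intro i cur
    have hlen : (i+1) + (rest.length : Int) = i + ((l :: rest).length : Int) := by
      simp [List.length_cons]; ring
    simp only [findA_go, hdrsB]
    by_cases h1 : PySem.Str.startswith (PySem.Str.strip l) "#" = true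
    · simp only [h1, if_true]
      rw [ih, hlen]
    · simp only [h1, if_false, Bool.false_eq_true]
      cases hs : PySem.Str.split₀ (PySem.Str.strip l) with
      | nil => rw [ih, hlen]
      | cons p0 ps =>
        by_cases h2 : (p0 == "backend" || p0 == "listen" || p0 == "frontend") = true
        · simp only [h2, if_true]
          by_cases h3 : (p0 == "backend") = true
          · simp only [h3, if_true]
            rw [ih, hlen]
            simp only [emitB]
            simp only [h3, if_true]
            simp [firstIdx, closeC]
            cases ps <;> simp
          · simp only [h3, if_false, Bool.false_eq_true]
            rw [ih, hlen]
            simp only [emitB]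
            simp only [h3, if_false, Bool.false_eq_true]
            simp [firstIdx, closeC]
        · simp only [h2, if_false, Bool.false_eq_true]
          rw [ih, hlen]

-- ===== VERDICT (by name: the statement is the Claim_ definition above) =====
theorem find_backends_spec : Claim_equal_find_backends := by
  intro lines _
  show find_backends lines = find_backends_alt lines
  rw [find_backends, find_backends_alt, go_eq]
  simp [closeC]
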